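-- pv_equiv track=rewrite | github.com/AndresCalle9/programming-class | Parcial repaso/sln.py | get_by_category
-- ===== SOURCE A (Python) =====
-- def get_by_category(datos):
--     data_category = {}
--     for i in range(1,len(datos)):
--         category = datos[i].split(',')[1]
--         if category not in data_category:
--             data_category[category] = []
--         data_category[category].append(datos[i])
--     return data_category
-- ===== SOURCE B (Python) =====
-- def get_by_category(datos):
--     rows = datos[1:]
--     key = lambda r: r.split(',')[1]
--     keys = list(dict.fromkeys(key(r) for r in rows))
--     return {k: [r for r in rows if key(r) == k] for k in keys}
-- ===== Notes on version B (the rewrite author's own statement) =====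
-- stated objective: alternative
-- what changed: B replaces A's single hash-accumulation pass over indices with a two-phase plan: ordered dedup of the categories of datos[1:], then a comprehension that filters the rows for each category.
import Mathlib
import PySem

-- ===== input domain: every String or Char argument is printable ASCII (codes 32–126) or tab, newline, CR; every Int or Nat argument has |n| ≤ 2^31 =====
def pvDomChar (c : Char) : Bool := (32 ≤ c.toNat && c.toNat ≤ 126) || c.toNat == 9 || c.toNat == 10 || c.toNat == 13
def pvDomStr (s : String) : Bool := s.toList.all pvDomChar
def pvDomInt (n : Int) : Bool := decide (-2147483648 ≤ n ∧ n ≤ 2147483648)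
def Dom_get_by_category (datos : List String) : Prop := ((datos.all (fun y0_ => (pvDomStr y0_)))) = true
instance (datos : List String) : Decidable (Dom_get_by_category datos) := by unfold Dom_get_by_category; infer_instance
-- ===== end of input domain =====

-- B groups the rows of datos[1:] by their second comma-field via ordered dedup of the keys plus a
-- per-key filter, instead of A's single dict-accumulation pass; same return value, no speed claim.

-- row.split(',')[1]; total form — under Pre_ the index 1 is always in range
def pvKey (r : String) : String :=
  PySem.List.pyGetD ((PySem.Str.split? r ",").getD []) 1 ""

-- ===== PORT A =====
-- loop body of A: membership test, optional d[category] = [], then append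
def pvStepA (d : PySem.Dict String (List String)) (row : String) :
    PySem.Dict String (List String) :=
  let category := pvKey row
  let d := if d.contains category then d else d.insert category []
  d.modify category [] (fun l => l ++ [row])

def get_by_category (datos : List String) : List (String × List String) :=
  ((PySem.List.pyRange 1 (datos.length : Int) 1).foldl
    (fun d i => pvStepA d (PySem.List.pyGetD datos i ""))
    PySem.Dict.empty).items

-- ===== PORT B =====
def get_by_category_alt (datos : List String) : List (String × List String) :=
  let rows := PySem.List.slice datos (some 1) none
  let keys := PySem.List.dedup (rows.map pvKey)
  keys.map (fun k => (k, rows.filter (fun r => pvKey r == k)))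

-- ===== PRECONDITION & SPEC =====
-- Pre_ excludes exactly the inputs where A raises IndexError: a non-header row with no comma
-- makes row.split(',')[1] fail.
def Pre_get_by_category (datos : List String) : Prop :=
  ∀ r ∈ datos.drop 1, 2 ≤ ((PySem.Str.split? r ",").getD []).length
instance (datos : List String) : Decidable (Pre_get_by_category datos) := by
  unfold Pre_get_by_category; infer_instance
def pvWitness_get_by_category : List String := ["name,category", "a,x", "b,y", "c,x"]
def Spec_get_by_category (datos : List String) (out : List (String × List String)) : Prop := out = get_by_category_alt datos
instance (datos : List String) (out : List (String × List String)) : Decidable (Spec_get_by_category datos out) := by unfold Spec_get_by_category; infer_instance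

-- ===== CLAIM (what is proved, stated in full; the proofs are below) =====
def Claim_equal_get_by_category : Prop := ∀ (datos : List String), Dom_get_by_category datos → Pre_get_by_category datos → Spec_get_by_category datos (get_by_category datos)

-- ===== LEMMAS AND PROOFS =====

-- A's loop body ("ensure key present, then append") is exactly Dict.modify with default []
theorem pvStepA_eq_modify (d : PySem.Dict String (List String)) (row : String) :
    pvStepA d row = d.modify (pvKey row) [] (fun l => l ++ [row]) := by
  unfold pvStepA
  by_cases h : d.contains (pvKey row) = true
  · simp [h]
  · simp only [h, Bool.false_eq_true, if_false]
    simp only [PySem.Dict.modify, PySem.Dict.getD_insert_self,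
      PySem.Dict.insert_insert_self,
      PySem.Dict.getD_of_not_contains d ([] : List String) (by simpa using h)]

-- the accumulation fold, characterised: items = ordered distinct keys paired with the filters
theorem pvFold_eq (rows : List String) :
    (rows.foldl (fun d row => d.modify (pvKey row) [] (fun l => l ++ [row]))
        (PySem.Dict.empty : PySem.Dict String (List String))).items
      = (PySem.Set.ofList (rows.map pvKey)).map
          (fun k => (k, rows.filter (fun r => pvKey r == k))) := by
  have hkeys :
      (rows.foldl (fun d row => d.modify (pvKey row) [] (fun l => l ++ [row]))
        (PySem.Dict.empty : PySem.Dict String (List String))).keys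
        = PySem.Set.ofList (rows.map pvKey) := by
    have := PySem.Dict.keys_foldl_modify_key rows pvKey []
      (fun _ row l => l ++ [row]) (PySem.Dict.empty : PySem.Dict String (List String))
    simpa [PySem.Dict.keys_empty, PySem.Set.update, PySem.Set.ofList_eq_foldl] using this
  have hnd :
      (rows.foldl (fun d row => d.modify (pvKey row) [] (fun l => l ++ [row]))
        (PySem.Dict.empty : PySem.Dict String (List String))).keys.Nodup := by
    exact PySem.Dict.nodup_keys_foldl_modify_key rows pvKey []
      (fun _ row l => l ++ [row]) _ (by simp [PySem.Dict.keys_empty])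
  have hgetD : ∀ c,
      (rows.foldl (fun d row => d.modify (pvKey row) [] (fun l => l ++ [row]))
        (PySem.Dict.empty : PySem.Dict String (List String))).getD c []
        = rows.filter (fun r => pvKey r == c) := by
    intro c
    have := PySem.Dict.getD_foldl_modify_append
      (rows.map (fun r => (pvKey r, r)))
      (PySem.Dict.empty : PySem.Dict String (List String)) c
    rw [List.foldl_map] at this
    simpa [PySem.Dict.getD_empty, List.filter_map, Function.comp_def] using this
  rw [PySem.Dict.items_eq_map_keys _ hnd [], hkeys]
  exact List.map_congr_left (fun k _ => by rw [hgetD k])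

-- ===== VERDICT (by name: the statement is the Claim_ definition above) =====
theorem get_by_category_spec : Claim_equal_get_by_category := by
  intro datos _ _
  unfold Spec_get_by_category get_by_category get_by_category_alt
  simp only [PySem.List.slice_from_one, pvStepA_eq_modify]
  rw [PySem.List.foldl_pyRange_pyGetD' datos ""
      (fun d row => PySem.Dict.modify d (pvKey row) [] (fun l => l ++ [row]))
      PySem.Dict.empty (a := 1) (by norm_num)]
  simp only [PySem.List.dedup_eq_ofList]
  simpa [List.drop_one] using pvFold_eq datos.tail
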